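-- pv_equiv track=rewrite | github.com/Oryan-Hassidim/Ex | Ex5/diagonal_yifa.py | diagonal1
-- ===== SOURCE A (Python) =====
-- def diagonal1(matrix):
--     """
--     The function takes the upper left corner and turn each diagonal into a string,
--     :param matrix:the matrix that we search for our words in it
--     :return: a list of all the strings consist of the diagonals
--     """
--     corner_strings_xy = []
--     for row in range(len(matrix) - 2, -1, -1):
--         diag_str = matrix[row][0]
--         for j in range(1, row + 1):
--             diag_str += matrix[row - j][j]
--             if (j + 1) == len(matrix[0]):
--                 break
--         corner_strings_xy.append(diag_str)
--     return corner_strings_xy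
-- ===== SOURCE B (Python) =====
-- def diagonal1(matrix):
--     """Bucket characters by diagonal index s = i + j in one pass over the matrix
--     (rows visited bottom-up so each diagonal collects in increasing column order,
--     rows clipped to the matrix width), then emit the joined buckets for
--     s = len(matrix)-2 down to 0."""
--     n = len(matrix)
--     if n < 2:
--         return []
--     width = len(matrix[0])
--     buckets = {}
--     for i in range(n - 1, -1, -1):
--         for j, ch in enumerate(matrix[i][:width]):
--             if i + j < n - 1:
--                 buckets.setdefault(i + j, []).append(ch)
--     return [''.join(buckets.get(s, [])) for s in range(n - 2, -1, -1)]
-- ===== Notes on version B (the rewrite author's own statement) =====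
-- stated objective: alternative
-- what changed: A builds each diagonal string with a per-diagonal accumulator loop that walks up the diagonal and breaks at the column cap; B makes one pass over the matrix (rows bottom-up, clipped to the matrix width) bucketing characters by diagonal index s = i + j into a dict and then joins the buckets for s = len(matrix)-2 down to 0; Pre_ excludes exactly the inputs on which A raises IndexError (a scanned cell missing from a short row).
import Mathlib
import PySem

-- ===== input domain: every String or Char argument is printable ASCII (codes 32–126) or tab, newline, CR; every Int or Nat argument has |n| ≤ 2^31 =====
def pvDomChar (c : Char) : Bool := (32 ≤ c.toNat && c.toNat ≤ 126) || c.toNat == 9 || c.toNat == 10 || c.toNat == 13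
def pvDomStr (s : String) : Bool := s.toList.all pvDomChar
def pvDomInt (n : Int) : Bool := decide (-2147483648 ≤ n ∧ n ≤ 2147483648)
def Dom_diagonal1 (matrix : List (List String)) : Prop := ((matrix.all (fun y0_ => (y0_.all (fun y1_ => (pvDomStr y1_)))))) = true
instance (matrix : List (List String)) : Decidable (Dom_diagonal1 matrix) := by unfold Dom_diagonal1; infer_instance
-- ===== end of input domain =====

-- B replaces A's per-diagonal accumulator loop (with its break) by one pass over the matrix
-- (rows bottom-up, each row clipped to the matrix width) that buckets characters by diagonal
-- index s = i + j in a dict and joins the buckets; objective: alternative decomposition.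

-- ===== PORT A =====
def diagonal1 (matrix : List (List String)) : List String :=
  (PySem.List.pyRange ((matrix.length : Int) - 2) (-1) (-1)).foldl
    (fun acc row =>
      let st := (PySem.List.pyRange 1 (row + 1) 1).foldl
        (fun (st : String × Bool) j =>
          if st.2 then st
          else (st.1 ++ PySem.List.pyGetD (PySem.List.pyGetD matrix (row - j) []) j "",
                j + 1 == ((PySem.List.pyGetD matrix 0 []).length : Int)))
        (PySem.List.pyGetD (PySem.List.pyGetD matrix row []) 0 "", false)
      acc ++ [st.1])
    []

-- ===== PORT B =====
def diagonal1_alt (matrix : List (List String)) : List String :=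
  let n : Int := matrix.length
  if n < 2 then []
  else
    let width : Int := (PySem.List.pyGetD matrix 0 []).length
    let buckets : PySem.Dict Int (List String) :=
      (PySem.List.pyRange (n - 1) (-1) (-1)).foldl
        (fun d i =>
          (PySem.List.enumerate
              (PySem.List.slice (PySem.List.pyGetD matrix i []) none (some width))).foldl
            (fun d2 p =>
              if i + p.1 < n - 1 then d2.modify (i + p.1) [] (· ++ [p.2]) else d2)
            d)
        PySem.Dict.empty
    (PySem.List.pyRange (n - 2) (-1) (-1)).map
      (fun s => PySem.Str.join "" (buckets.getD s []))

-- ===== PRECONDITION & SPEC =====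
-- Pre_ excludes exactly the inputs where A raises IndexError: some cell matrix[i][j] that the
-- scan reads (i + j ≤ len(matrix)-2, j capped by len(matrix[0]) as in A) is missing.
def Pre_diagonal1 (matrix : List (List String)) : Prop :=
  ∀ i < matrix.length - 1,
    (if 2 ≤ (matrix.getD 0 []).length
     then min (matrix.length - 2 - i) ((matrix.getD 0 []).length - 1)
     else matrix.length - 2 - i) < (matrix.getD i []).length
instance (matrix : List (List String)) : Decidable (Pre_diagonal1 matrix) := by unfold Pre_diagonal1; infer_instance
def pvWitness_diagonal1 : List (List String) := [["a", "b"], ["c", "d"]]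
def Spec_diagonal1 (matrix : List (List String)) (out : List String) : Prop := out = diagonal1_alt matrix
instance (matrix : List (List String)) (out : List String) : Decidable (Spec_diagonal1 matrix out) := by unfold Spec_diagonal1; infer_instance

-- ===== CLAIM (what is proved, stated in full; the proofs are below) =====
def Claim_equal_diagonal1 : Prop := ∀ (matrix : List (List String)), Dom_diagonal1 matrix → Pre_diagonal1 matrix → Spec_diagonal1 matrix (diagonal1 matrix)

-- ===== LEMMAS AND PROOFS =====

/-- Width of row 0 (Python's `len(matrix[0])`). -/
def pvCap (m : List (List String)) : Nat := (m.getD 0 []).length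

/-- The cell `matrix[i][j]`, defaulting to `""`. -/
def pvCell (m : List (List String)) (i j : Nat) : String := (m.getD i []).getD j ""

/-- Largest column index A reads on diagonal `s`. -/
def pvJ (m : List (List String)) (s : Nat) : Nat :=
  if 2 ≤ pvCap m then min s (pvCap m - 1) else s

/-- Cells of diagonal `r` for columns `0..t`. -/
def pvCellsUpTo (m : List (List String)) (r t : Nat) : List String :=
  (List.range (t + 1)).map (fun j => pvCell m (r - j) j)

/-- Left fold concatenation of strings. -/
def pvCat (L : List String) : String := L.foldl (· ++ ·) ""

theorem pvCat_append (L : List String) (c : String) : pvCat (L ++ [c]) = pvCat L ++ c := by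
  simp [pvCat, List.foldl_append]

theorem pvJoinNilCons (a : String) (L : List String) :
    PySem.Str.join "" (a :: L) = a ++ PySem.Str.join "" L := by
  cases L with
  | nil =>
    have h : (PySem.Str.join "" [a]).toList = (a ++ PySem.Str.join "" []).toList := by
      simp [PySem.Str.toList_join, PySem.Chars.join_singleton, PySem.Chars.join_nil]
    exact String.toList_inj.mp h
  | cons b t =>
    have h : (PySem.Str.join "" (a :: b :: t)).toList
        = (a ++ PySem.Str.join "" (b :: t)).toList := by
      simp [PySem.Str.toList_join, PySem.Chars.join_cons_cons]
    exact String.toList_inj.mp h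

theorem pvFoldAppend (L : List String) (x : String) :
    L.foldl (· ++ ·) x = x ++ PySem.Str.join "" L := by
  induction L generalizing x with
  | nil =>
    have h : (PySem.Str.join "" []).toList = ("" : String).toList := by
      simp [PySem.Str.toList_join, PySem.Chars.join_nil]
    rw [String.toList_inj.mp h]; simp
  | cons a t ih =>
    rw [List.foldl_cons, ih, pvJoinNilCons, String.append_assoc]

theorem pvCat_eq_join (L : List String) : pvCat L = PySem.Str.join "" L := by
  rw [pvCat, pvFoldAppend]; simp

/-- A's inner loop (columns 1..k with the break) characterised. -/
theorem pvA_inner (m : List (List String)) (r k : Nat) (hk : k ≤ r) :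
    (PySem.List.pyRange 1 ((k : Int) + 1) 1).foldl
      (fun (st : String × Bool) j =>
        if st.2 then st
        else (st.1 ++ PySem.List.pyGetD (PySem.List.pyGetD m ((r : Int) - j) []) j "",
              j + 1 == ((PySem.List.pyGetD m 0 []).length : Int)))
      (PySem.List.pyGetD (PySem.List.pyGetD m (r : Int) []) 0 "", false)
    = if 2 ≤ pvCap m ∧ pvCap m - 1 ≤ k
      then (pvCat (pvCellsUpTo m r (pvCap m - 1)), true)
      else (pvCat (pvCellsUpTo m r k), false) := by
  induction k with
  | zero =>
    rw [show ((0 : Nat) : Int) + 1 = 1 by norm_num, PySem.List.pyRange_one_eq_nil le_rfl]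
    have hcap : ¬ (2 ≤ pvCap m ∧ pvCap m - 1 ≤ 0) := by omega
    rw [if_neg hcap]
    simp [pvCellsUpTo, pvCat, pvCell, PySem.List.pyGetD_natCast, PySem.List.pyGetD_zero]
  | succ k ih =>
    have hk' : k ≤ r := by omega
    rw [show (((k + 1 : Nat)) : Int) + 1 = ((k : Int) + 1) + 1 by push_cast; ring,
        PySem.List.pyRange_one_succ_right (by omega), List.foldl_append, ih hk']
    by_cases h2 : 2 ≤ pvCap m ∧ pvCap m - 1 ≤ k
    · rw [if_pos h2, if_pos (show 2 ≤ pvCap m ∧ pvCap m - 1 ≤ k + 1 by omega)]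
      simp
    · rw [if_neg h2]
      have hidx : (r : Int) - ((k : Int) + 1) = (((r - (k + 1) : Nat)) : Int) := by
        omega
      have hidx2 : ((k : Int) + 1) = (((k + 1 : Nat)) : Int) := by omega
      have hcell : PySem.List.pyGetD (PySem.List.pyGetD m ((r : Int) - ((k : Int) + 1)) [])
          ((k : Int) + 1) "" = pvCell m (r - (k + 1)) (k + 1) := by
        rw [hidx, PySem.List.pyGetD_natCast, hidx2, PySem.List.pyGetD_natCast]; rfl
      have hsplit : pvCellsUpTo m r (k + 1)
          = pvCellsUpTo m r k ++ [pvCell m (r - (k + 1)) (k + 1)] := by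
        rw [pvCellsUpTo, List.range_succ, List.map_append, List.map_cons, List.map_nil]
        rfl
      have hcells : pvCat (pvCellsUpTo m r k) ++ pvCell m (r - (k + 1)) (k + 1)
          = pvCat (pvCellsUpTo m r (k + 1)) := by
        rw [hsplit, pvCat_append]
      simp only [List.foldl_cons, List.foldl_nil, Bool.false_eq_true, if_false, hcell,
        PySem.List.pyGetD_zero]
      by_cases hc : pvCap m = k + 2
      · rw [if_pos (show 2 ≤ pvCap m ∧ pvCap m - 1 ≤ k + 1 by omega)]
        have hflag : (((k : Int) + 1 + 1) == (((m.getD 0 []).length : Nat) : Int)) = true := by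
          simp only [beq_iff_eq]
          have : (m.getD 0 []).length = pvCap m := rfl
          rw [this, hc]; push_cast; ring
        rw [hflag, hcells]
        have : pvCap m - 1 = k + 1 := by omega
        rw [this]
      · rw [if_neg (show ¬ (2 ≤ pvCap m ∧ pvCap m - 1 ≤ k + 1) by omega)]
        have hflag : (((k : Int) + 1 + 1) == (((m.getD 0 []).length : Nat) : Int)) = false := by
          simp only [beq_eq_false_iff_ne, ne_eq]
          have : (m.getD 0 []).length = pvCap m := rfl
          rw [this]; intro h; apply hc; omega
        rw [hflag, hcells]

/-- A's output as a map over the descending row range. -/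
theorem pvA_map (m : List (List String)) :
    diagonal1 m = (PySem.List.pyRange ((m.length : Int) - 2) (-1) (-1)).map
      (fun row => pvCat (pvCellsUpTo m row.toNat (pvJ m row.toNat))) := by
  rw [diagonal1, PySem.List.foldl_append_singleton_eq_map, List.nil_append]
  apply List.map_congr_left
  intro row hrow
  rw [PySem.List.mem_pyRange_neg_one] at hrow
  have hr0 : 0 ≤ row := by omega
  have hrow' : row = ((row.toNat : Nat) : Int) := by omega
  rw [hrow']
  simp only [Int.toNat_natCast]
  rw [pvA_inner m row.toNat row.toNat le_rfl]
  by_cases h2 : 2 ≤ pvCap m ∧ pvCap m - 1 ≤ row.toNat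
  · rw [if_pos h2, pvJ, if_pos h2.1,
      show min row.toNat (pvCap m - 1) = pvCap m - 1 by omega]
  · rw [if_neg h2, pvJ]
    by_cases hcap : 2 ≤ pvCap m
    · rw [if_pos hcap, show min row.toNat (pvCap m - 1) = row.toNat by omega]
    · rw [if_neg hcap]

/-- B's per-row filtered, diagonal-keyed pair list. -/
def pvPairs (m : List (List String)) (i : Int) : List (Int × String) :=
  ((PySem.List.enumerate
      (PySem.List.slice (PySem.List.pyGetD m i []) none (some ((m.getD 0 []).length : Int))) 0).filter
      (fun p => decide (i + p.1 < (m.length : Int) - 1))).map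
    (fun p => (i + p.1, p.2))

/-- Filtering an enumeration by an index predicate that admits at most the index `t`. -/
theorem pvEnumFilter {α : Type} (xs : List α) (s0 : Int) (φ : Int → Bool) (t : Int)
    (hφ : ∀ j, φ j = true → j = t) :
    (PySem.List.enumerate xs s0).filter (fun p => φ p.1) =
      if h : 0 ≤ t - s0 ∧ (t - s0).toNat < xs.length ∧ φ t = true
      then [(t, xs[(t - s0).toNat])] else [] := by
  induction xs generalizing s0 with
  | nil =>
    rw [dif_neg (by intro h; exact absurd h.2.1 (by simp))]
    simp [PySem.List.enumerate_nil]
  | cons x xs ih =>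
    rw [PySem.List.enumerate_cons]
    by_cases hx : φ s0 = true
    · obtain rfl : s0 = t := hφ _ hx
      rw [List.filter_cons_of_pos (by simpa using hx), ih (s0 + 1),
        dif_neg (by intro h; omega),
        dif_pos ⟨by omega, by simp, hx⟩]
      simp
    · rw [List.filter_cons_of_neg (by simpa using hx), ih (s0 + 1)]
      by_cases hc : 0 ≤ t - (s0 + 1) ∧ (t - (s0 + 1)).toNat < xs.length ∧ φ t = true
      · have hk : (t - s0).toNat = (t - (s0 + 1)).toNat + 1 := by omega
        rw [dif_pos hc, dif_pos ⟨by omega, by simp [hk]; omega, hc.2.2⟩]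
        simp only [hk, List.getElem_cons_succ]
      · rw [dif_neg hc, dif_neg (by
          intro h
          have hne : t ≠ s0 := by intro he; rw [he] at h; exact hx h.2.2
          exact hc ⟨by omega, by have := h.2.1; simp at this; omega, h.2.2⟩)]

/-- A single row's contribution to diagonal `s`. -/
theorem pvRowFilter (m : List (List String)) (s b : Nat) :
    (pvPairs m (b : Int)).filter (fun q => q.1 == (s : Int)) =
      if b ≤ s ∧ s + 2 ≤ m.length ∧ s - b < (m.getD b []).length ∧ s - b < pvCap m
      then [((s : Int), pvCell m b (s - b))] else [] := by
  rw [pvPairs, PySem.List.pyGetD_natCast, PySem.List.slice_to_natCast,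
    List.filter_map, List.filter_filter]
  simp only [Function.comp]
  rw [pvEnumFilter ((m.getD b []).take (m.getD 0 []).length) 0
    (fun j => (((b : Nat) : Int) + j == ((s : Nat) : Int)) &&
      (decide (((b : Nat) : Int) + j < (m.length : Int) - 1)))
    ((s : Int) - (b : Int))
    (by intro j h; simp only [Bool.and_eq_true, beq_iff_eq, decide_eq_true_eq] at h; omega)]
  have hlen : ((m.getD b []).take (m.getD 0 []).length).length
      = min (m.getD 0 []).length (m.getD b []).length := List.length_take
  by_cases hc : b ≤ s ∧ s + 2 ≤ m.length ∧ s - b < (m.getD b []).length ∧ s - b < pvCap m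
  · have hlt : s - b < ((m.getD b []).take (m.getD 0 []).length).length := by
      rw [hlen]; have := hc.2.2; rw [pvCap] at this; omega
    rw [dif_pos ⟨by omega, by rw [show (((s : Int) - (b : Int)) - 0).toNat = s - b by omega]; exact hlt, by
        simp only [Bool.and_eq_true, beq_iff_eq, decide_eq_true_eq]
        exact ⟨by ring, by omega⟩⟩,
      if_pos hc, List.map_cons, List.map_nil]
    have h1 : ((b : Int) + (((s : Int) - (b : Int)))) = (s : Int) := by ring
    have h2 : ((((s : Int) - (b : Int))) - 0).toNat = s - b := by omega
    simp only [h1, h2]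
    have hlt' : s - b < (m.getD b []).length := hc.2.2.1
    rw [List.getElem_take, pvCell, List.getD_eq_getElem _ _ hlt']
  · rw [if_neg hc, dif_neg (by
      intro h
      obtain ⟨h1, h2, h3⟩ := h
      simp only [Bool.and_eq_true, beq_iff_eq, decide_eq_true_eq] at h3
      rw [show (((s : Int) - (b : Int)) - 0).toNat = s - b by omega, hlen] at h2
      apply hc
      exact ⟨by omega, by omega, by omega, by rw [pvCap]; omega⟩), List.map_nil]

/-- The rows `a-1 .. 0` contribute a contiguous tail of diagonal `s`. -/
theorem pvBlock (m : List (List String)) (hpre : Pre_diagonal1 m) (s : Nat)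
    (hs : s + 2 ≤ m.length) (a : Nat) (ha : a ≤ m.length) :
    (PySem.List.pyRange ((a : Int) - 1) (-1) (-1)).flatMap
        (fun i => (pvPairs m i).filter (fun q => q.1 == (s : Int)))
      = (List.range' (s + 1 - min a (s + 1)) (min a (s + 1) - (s - pvJ m s))).map
          (fun j => ((s : Int), pvCell m (s - j) j)) := by
  have hJle : pvJ m s ≤ s := by rw [pvJ]; split <;> omega
  induction a with
  | zero =>
    rw [PySem.List.pyRange_neg_one_eq_nil (by norm_num)]
    rw [show min 0 (s + 1) - (s - pvJ m s) = 0 by omega, List.range'_zero, List.map_nil,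
      List.flatMap_nil]
  | succ a ih =>
    have ha' : a ≤ m.length := by omega
    rw [show (((a + 1 : Nat)) : Int) - 1 = ((a : Nat) : Int) by omega,
      PySem.List.pyRange_neg_one_cons (by omega), List.flatMap_cons, ih ha', pvRowFilter]
    by_cases h1 : a ≤ s
    · by_cases h2 : s - pvJ m s ≤ a
      · have hlen : s - a < (m.getD a []).length := by
          have hp := hpre a (by omega)
          rw [show (m.getD 0 []).length = pvCap m from rfl] at hp
          by_cases hcap : 2 ≤ pvCap m
          · rw [if_pos hcap] at hp
            rw [pvJ, if_pos hcap] at h2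
            omega
          · rw [if_neg hcap] at hp
            rw [pvJ, if_neg hcap] at h2
            omega
        have hcapc : s - a < pvCap m := by
          by_cases hcap : 2 ≤ pvCap m
          · rw [pvJ, if_pos hcap] at h2; omega
          · have hp0 := hpre 0 (by omega)
            rw [show (m.getD 0 []).length = pvCap m from rfl, if_neg hcap] at hp0
            have : (m.getD 0 []).length = pvCap m := rfl
            omega
        rw [if_pos ⟨h1, hs, hlen, hcapc⟩]
        rw [show min (a + 1) (s + 1) = a + 1 by omega,
          show min a (s + 1) = a by omega,
          show a + 1 - (s - pvJ m s) = (a - (s - pvJ m s)) + 1 by omega,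
          show s + 1 - (a + 1) = s - a by omega,
          List.range'_succ, List.map_cons,
          show s - a + 1 = s + 1 - a by omega,
          show s - (s - a) = a by omega, List.singleton_append]
      · rw [if_neg (by
          rintro ⟨-, -, -, hc⟩
          rw [pvJ] at h2
          by_cases hcap : 2 ≤ pvCap m
          · rw [if_pos hcap] at h2; omega
          · rw [if_neg hcap] at h2; omega)]
        rw [List.nil_append,
          show min a (s + 1) - (s - pvJ m s) = 0 by omega,
          show min (a + 1) (s + 1) - (s - pvJ m s) = 0 by omega]
        simp [List.range'_zero]
    · rw [if_neg (by rintro ⟨hb, -⟩; omega), List.nil_append,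
        show min (a + 1) (s + 1) = s + 1 by omega,
        show min a (s + 1) = s + 1 by omega]

/-- B's output as a map over the descending diagonal range. -/
theorem pvB_map (m : List (List String)) (hpre : Pre_diagonal1 m) :
    diagonal1_alt m = (PySem.List.pyRange ((m.length : Int) - 2) (-1) (-1)).map
      (fun row => PySem.Str.join "" (pvCellsUpTo m row.toNat (pvJ m row.toNat))) := by
  rw [diagonal1_alt]
  by_cases hn : (m.length : Int) < 2
  · rw [if_pos hn, PySem.List.pyRange_neg_one_eq_nil (by omega), List.map_nil]
  · rw [if_neg hn]
    simp only [PySem.List.pyGetD_zero]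
    have hrow : ∀ (d : PySem.Dict Int (List String)) (i : Int),
        (PySem.List.enumerate
            (PySem.List.slice (PySem.List.pyGetD m i []) none (some ((m.getD 0 []).length : Int)))).foldl
          (fun d2 p =>
            if i + p.1 < (m.length : Int) - 1
            then d2.modify (i + p.1) [] (· ++ [p.2]) else d2) d
        = (pvPairs m i).foldl (fun d2 q => d2.modify q.1 [] (· ++ [q.2])) d := by
      intro d i
      rw [PySem.List.foldl_ite_eq_foldl_filter, pvPairs, List.foldl_map]
    apply List.map_congr_left
    intro t ht
    rw [PySem.List.mem_pyRange_neg_one] at ht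
    have ht0 : 0 ≤ t := by omega
    congr 1
    simp only [hrow]
    have hflat : List.foldl (fun d i =>
          List.foldl (fun (d2 : PySem.Dict Int (List String)) q =>
            d2.modify q.1 [] (· ++ [q.2])) d (pvPairs m i))
          PySem.Dict.empty (PySem.List.pyRange ((m.length : Int) - 1) (-1) (-1))
        = List.foldl (fun (d2 : PySem.Dict Int (List String)) q =>
            d2.modify q.1 [] (· ++ [q.2])) PySem.Dict.empty
          (((PySem.List.pyRange ((m.length : Int) - 1) (-1) (-1)).map (pvPairs m)).flatten) := by
      rw [List.foldl_flatten, List.foldl_map]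
    rw [hflat]
    rw [PySem.Dict.getD_foldl_modify_append,
      show (PySem.Dict.empty : PySem.Dict Int (List String)).getD t [] = [] by
        simp [PySem.Dict.empty, PySem.Dict.getD, PySem.Dict.get?],
      List.nil_append, ← List.flatMap_def, List.filter_flatMap]
    have hts : t = ((t.toNat : Nat) : Int) := by omega
    rw [hts, pvBlock m hpre t.toNat (by omega) m.length le_rfl]
    rw [show t.toNat + 1 - min m.length (t.toNat + 1) = 0 by omega]
    have hJle : pvJ m t.toNat ≤ t.toNat := by rw [pvJ]; split <;> omega
    rw [show min m.length (t.toNat + 1) - (t.toNat - pvJ m t.toNat)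
        = pvJ m t.toNat + 1 by omega,
      ← List.range_eq_range', List.map_map, pvCellsUpTo, Int.toNat_natCast]
    rfl

-- ===== VERDICT (by name: the statement is the Claim_ definition above) =====
theorem diagonal1_spec : Claim_equal_diagonal1 := by
  intro matrix _ hpre
  unfold Spec_diagonal1
  rw [pvA_map, pvB_map matrix hpre]
  exact List.map_congr_left fun row _ => pvCat_eq_join _
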